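-- pv_equiv track=rewrite | github.com/Intellouis/Probabilistic-PDDL-Solver | CP_sparse.py | k2ij
-- ===== SOURCE A (Python) =====
-- NUM_BLOCKS = 8
--
-- def k2ij(k):
--     """
--     Mapping state index to obj index.
--
--     input:
--     - k: index of ground atom in 64-dimensional vector
--
--     output:
--     - i, j: corresponding index of block
--     """
--     idx = -1
--     for i in range(NUM_BLOCKS):
--         for j in range(NUM_BLOCKS):
--             if i == j:
--                 continue
--             idx += 1
--             if idx == k:
--                 return i, j
--     assert False, "should not reach here"
-- ===== SOURCE B (Python) =====
-- NUM_BLOCKS = 8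
--
-- def k2ij(k):
--     """Closed-form: i = k // (NUM_BLOCKS-1), r = k % (NUM_BLOCKS-1), j skips the diagonal."""
--     assert 0 <= k < NUM_BLOCKS * (NUM_BLOCKS - 1), "should not reach here"
--     i, r = divmod(k, NUM_BLOCKS - 1)
--     j = r if r < i else r + 1
--     return i, j
-- ===== Notes on version B (the rewrite author's own statement) =====
-- stated objective: simpler
-- what changed: Replaces the double loop scanning all 56 off-diagonal (i,j) pairs with closed-form arithmetic: i = k // 7, r = k % 7, j = r if r < i else r + 1.
import Mathlib
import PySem

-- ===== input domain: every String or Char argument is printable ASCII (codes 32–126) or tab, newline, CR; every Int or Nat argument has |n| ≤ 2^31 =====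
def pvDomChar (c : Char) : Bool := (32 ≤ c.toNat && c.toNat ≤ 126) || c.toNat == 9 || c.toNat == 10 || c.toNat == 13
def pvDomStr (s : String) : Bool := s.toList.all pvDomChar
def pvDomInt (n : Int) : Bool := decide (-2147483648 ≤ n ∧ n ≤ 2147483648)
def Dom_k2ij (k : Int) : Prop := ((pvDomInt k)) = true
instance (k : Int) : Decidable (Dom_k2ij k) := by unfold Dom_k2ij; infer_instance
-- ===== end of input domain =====

-- B replaces A's double loop over all 56 off-diagonal pairs with closed-form divmod arithmetic (objective: simpler).

-- ===== PORT A =====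
-- inner loop 'for j in range(NUM_BLOCKS)': threads idx, may return (i, j)
def k2ijInner (k i idx : Int) : List Int → Option (Int × Int) × Int
  | [] => (none, idx)
  | j :: js =>
    if i == j then k2ijInner k i idx js
    else
      let idx' := idx + 1
      if idx' == k then (some (i, j), idx') else k2ijInner k i idx' js

-- outer loop 'for i in range(NUM_BLOCKS)'
def k2ijOuter (k idx : Int) : List Int → Option (Int × Int)
  | [] => none
  | i :: is =>
    match k2ijInner k i idx (PySem.List.pyRange 0 8 1) with
    | (some r, _) => some r
    | (none, idx') => k2ijOuter k idx' is

-- 'assert False' when the loops fall through raises: those k are outside Pre_k2ij; .getD (0,0) is a placeholder there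
def k2ij (k : Int) : Int × Int :=
  (k2ijOuter k (-1) (PySem.List.pyRange 0 8 1)).getD (0, 0)

-- ===== PORT B =====
-- B's assert (0 <= k < 56) raises outside Pre_k2ij; inside Pre_ it passes, so the port is the closed form
def k2ij_alt (k : Int) : Int × Int :=
  let i := PySem.Int.floordiv k 7
  let r := PySem.Int.mod k 7
  let j := if r < i then r else r + 1
  (i, j)

-- ===== PRECONDITION & SPEC =====
-- exactly the k on which A returns; elsewhere A raises AssertionError ("should not reach here")
def Pre_k2ij (k : Int) : Prop := 0 ≤ k ∧ k < 56
instance (k : Int) : Decidable (Pre_k2ij k) := by unfold Pre_k2ij; infer_instance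
def pvWitness_k2ij : Int := (13)

def Spec_k2ij (k : Int) (out : Int × Int) : Prop := out = k2ij_alt k
instance (k : Int) (out : Int × Int) : Decidable (Spec_k2ij k out) := by unfold Spec_k2ij; infer_instance

-- ===== CLAIM (what is proved, stated in full; the proofs are below) =====
def Claim_equal_k2ij : Prop := ∀ (k : Int), Dom_k2ij k → Pre_k2ij k → Spec_k2ij k (k2ij k)

-- ===== LEMMAS AND PROOFS =====

-- ===== VERDICT (by name: the statement is the Claim_ definition above) =====
theorem k2ij_spec : Claim_equal_k2ij := by
  unfold Claim_equal_k2ij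
  intro k _ hp
  obtain ⟨h0, h1⟩ := hp
  unfold Spec_k2ij
  interval_cases k <;> decide
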